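-- pv_equiv track=rewrite | github.com/zjremo/trae-agent | trae_agent/agent/trae_agent.py | remove_patches_to_tests
-- ===== SOURCE A (Python) =====
-- def remove_patches_to_tests(model_patch: str) -> str:
--     """
--     Remove any changes to the tests directory from the provided patch.
--     This is to ensure that the model_patch does not disturb the repo's
--     tests when doing acceptance testing with the `test_patch`.
--     """
--     lines = model_patch.splitlines(keepends=True)
--     filtered_lines: list[str] = []
--     test_patterns = ["/test/", "/tests/", "/testing/", "test_", "tox.ini"]
--     is_tests = False
--
--     for line in lines:
--         if line.startswith("diff --git a/"):
--             target_path = line.split()[-1]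
--             is_tests = target_path.startswith("b/") and any(
--                 p in target_path for p in test_patterns
--             )
--
--         if not is_tests:
--             filtered_lines.append(line)
--
--     return "".join(filtered_lines)
-- ===== SOURCE B (Python) =====
-- def remove_patches_to_tests(model_patch: str) -> str:
--     """Group-then-filter: split the patch into 'diff --git a/' segments,
--     drop the segments whose header targets a test file, keep the rest."""
--     lines = model_patch.splitlines(keepends=True)
--     test_patterns = ["/test/", "/tests/", "/testing/", "test_", "tox.ini"]
--
--     def is_header(line):
--         return line.startswith("diff --git a/")
--
--     def keep_segment(header):
--         target = header.split()[-1]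
--         return not (target.startswith("b/")
--                     and any(p in target for p in test_patterns))
--
--     n = len(lines)
--     i = 0
--     while i < n and not is_header(lines[i]):
--         i += 1
--     pieces = lines[:i]  # preamble before the first header is always kept
--     while i < n:
--         j = i + 1
--         while j < n and not is_header(lines[j]):
--             j += 1
--         if keep_segment(lines[i]):
--             pieces += lines[i:j]
--         i = j
--     return "".join(pieces)
-- ===== Notes on version B (the rewrite author's own statement) =====
-- stated objective: alternative
-- what changed: Replaces A's single line-by-line scan carrying an is_tests flag with a group-then-filter pass: the lines are partitioned into a preamble plus diff-header-anchored segments located by index scans, each whole segment is kept or dropped by classifying its header once, and the kept segments are concatenated.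
import Mathlib
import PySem

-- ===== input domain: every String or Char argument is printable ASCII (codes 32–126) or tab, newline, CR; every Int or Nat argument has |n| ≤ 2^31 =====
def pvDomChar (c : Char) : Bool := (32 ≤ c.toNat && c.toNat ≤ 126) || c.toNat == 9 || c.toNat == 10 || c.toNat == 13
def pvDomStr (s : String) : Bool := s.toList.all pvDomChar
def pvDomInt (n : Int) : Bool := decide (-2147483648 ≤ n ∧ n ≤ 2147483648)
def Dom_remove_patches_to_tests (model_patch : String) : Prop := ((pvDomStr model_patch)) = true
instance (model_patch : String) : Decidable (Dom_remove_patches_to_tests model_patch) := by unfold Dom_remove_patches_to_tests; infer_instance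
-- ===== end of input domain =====

-- B replaces A's flag-carrying line scan with a group-then-filter pass over header-anchored segments (alternative decomposition, same cost).


-- Hand port of str.splitlines(keepends=True) (PySem only has keepends=False); exact on Dom,
-- where the only line boundaries that can occur are '\n', '\r\n' and '\r'. Used by both ports
-- (both Pythons call the same builtin).
def pvSplitKeepAux (acc : List Char) : List Char → List (List Char)
  | [] => if acc = [] then [] else [acc.reverse]
  | '\r' :: '\n' :: rest => (acc.reverse ++ ['\r', '\n']) :: pvSplitKeepAux [] rest
  | '\r' :: rest => (acc.reverse ++ ['\r']) :: pvSplitKeepAux [] rest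
  | '\n' :: rest => (acc.reverse ++ ['\n']) :: pvSplitKeepAux [] rest
  | c :: rest => pvSplitKeepAux (c :: acc) rest

def pvSplitlinesKeep (s : List Char) : List (List Char) := pvSplitKeepAux [] s

-- ===== PORT A =====
-- A: one pass over the lines carrying the is_tests flag; a line is appended iff the flag is off.
-- line.split()[-1] cannot raise here (the line starts with "diff --git a/"), so .getD [] is never used.
def remove_patches_to_tests (model_patch : String) : String :=
  let lines := pvSplitlinesKeep model_patch.toList
  let test_patterns : List (List Char) :=
    ["/test/".toList, "/tests/".toList, "/testing/".toList, "test_".toList, "tox.ini".toList]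
  let st := lines.foldl (fun (st : List (List Char) × Bool) line =>
      let is_tests :=
        if PySem.Chars.startswith line "diff --git a/".toList then
          let target_path := (PySem.List.pyGet? (PySem.Chars.split₀ line) (-1)).getD []
          PySem.Chars.startswith target_path "b/".toList &&
            test_patterns.any (fun p => PySem.Chars.isIn p target_path)
        else st.2
      (if !is_tests then st.1 ++ [line] else st.1, is_tests))
    ([], false)
  String.ofList (PySem.Chars.join [] st.1)

-- ===== PORT B =====
def pvIsHeader (line : List Char) : Bool :=
  PySem.Chars.startswith line "diff --git a/".toList

def pvKeepSegment (header : List Char) : Bool :=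
  let target := (PySem.List.pyGet? (PySem.Chars.split₀ header) (-1)).getD []
  !(PySem.Chars.startswith target "b/".toList &&
    (["/test/".toList, "/tests/".toList, "/testing/".toList, "test_".toList, "tox.ini".toList]).any
      (fun p => PySem.Chars.isIn p target))

-- B's segment loop: 'lines' is [] or starts with a header; advance j to the next header
-- (= takeWhile/dropWhile on not-a-header), keep the whole segment iff its header passes.
def pvSegLoop : List (List Char) → List (List Char)
  | [] => []
  | h :: rest =>
      let body := rest.takeWhile (fun l => !pvIsHeader l)
      (if pvKeepSegment h then h :: body else []) ++
        pvSegLoop (rest.dropWhile (fun l => !pvIsHeader l))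
termination_by lines => lines.length
decreasing_by
  simp only [List.length_cons]
  exact Nat.lt_succ_of_le (List.length_dropWhile_le _ _)

def remove_patches_to_tests_alt (model_patch : String) : String :=
  let lines := pvSplitlinesKeep model_patch.toList
  let preamble := lines.takeWhile (fun l => !pvIsHeader l)
  String.ofList (PySem.Chars.join []
    (preamble ++ pvSegLoop (lines.dropWhile (fun l => !pvIsHeader l))))

-- ===== PRECONDITION & SPEC =====
def Spec_remove_patches_to_tests (model_patch : String) (out : String) : Prop := out = remove_patches_to_tests_alt model_patch
instance (model_patch : String) (out : String) : Decidable (Spec_remove_patches_to_tests model_patch out) := by unfold Spec_remove_patches_to_tests; infer_instance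

-- ===== CLAIM (what is proved, stated in full; the proofs are below) =====
def Claim_equal_remove_patches_to_tests : Prop := ∀ (model_patch : String), Dom_remove_patches_to_tests model_patch → Spec_remove_patches_to_tests model_patch (remove_patches_to_tests model_patch)

-- ===== LEMMAS AND PROOFS =====

-- A's loop, rewritten without the accumulator: the filtered lines produced from flag b.
def pvFA (b : Bool) : List (List Char) → List (List Char)
  | [] => []
  | l :: rest =>
      let b' := if pvIsHeader l then !pvKeepSegment l else b
      (if !b' then [l] else []) ++ pvFA b' rest

theorem pvFA_eq_foldl (lines : List (List Char)) : ∀ (acc : List (List Char)) (b : Bool),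
    (lines.foldl (fun (st : List (List Char) × Bool) line =>
      let is_tests :=
        if PySem.Chars.startswith line "diff --git a/".toList then
          let target_path := (PySem.List.pyGet? (PySem.Chars.split₀ line) (-1)).getD []
          PySem.Chars.startswith target_path "b/".toList &&
            (["/test/".toList, "/tests/".toList, "/testing/".toList, "test_".toList, "tox.ini".toList]).any
              (fun p => PySem.Chars.isIn p target_path)
        else st.2
      (if !is_tests then st.1 ++ [line] else st.1, is_tests)) (acc, b)).1
    = acc ++ pvFA b lines := by
  induction lines with
  | nil => intro acc b; simp [pvFA]
  | cons l rest ih =>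
      intro acc b
      simp only [List.foldl_cons, pvFA, pvIsHeader, pvKeepSegment]
      by_cases hh : PySem.Chars.startswith l "diff --git a/".toList = true
      · simp only [hh, if_true, Bool.not_not]
        rw [ih]
        split <;> simp
      · simp only [Bool.not_eq_true] at hh
        simp only [hh, Bool.false_eq_true, if_false]
        rw [ih]
        split <;> simp

-- On a header-free block, the flag never changes and the block is kept iff the flag is off.
theorem pvFA_no_header (b : Bool) (xs ys : List (List Char))
    (h : ∀ l ∈ xs, pvIsHeader l = false) :
    pvFA b (xs ++ ys) = (if b then [] else xs) ++ pvFA b ys := by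
  induction xs with
  | nil => simp
  | cons x xs ih =>
      have hx : pvIsHeader x = false := h x (List.mem_cons_self ..)
      have hrest : ∀ l ∈ xs, pvIsHeader l = false := fun l hl => h l (List.mem_cons_of_mem _ hl)
      simp only [List.cons_append, pvFA, hx, Bool.false_eq_true, if_false]
      rw [ih hrest]
      cases b <;> simp

-- The segment loop computes pvFA on any list that is empty or starts with a header.
theorem pvFA_eq_segLoop (n : Nat) : ∀ (lines : List (List Char)), lines.length ≤ n →
    (lines = [] ∨ ∃ h t, lines = h :: t ∧ pvIsHeader h = true) →
    ∀ b, pvFA b lines = pvSegLoop lines := by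
  induction n with
  | zero =>
      intro lines hlen _ b
      have : lines = [] := List.eq_nil_of_length_eq_zero (Nat.le_zero.mp hlen)
      subst this; simp [pvFA, pvSegLoop]
  | succ n ih =>
      intro lines hlen hshape b
      rcases hshape with rfl | ⟨h, t, rfl, hhd⟩
      · simp [pvFA, pvSegLoop]
      · have hsplit := List.takeWhile_append_dropWhile (p := fun l => !pvIsHeader l) (l := t)
        have hbody : ∀ l ∈ t.takeWhile (fun l => !pvIsHeader l), pvIsHeader l = false := by
          intro l hl
          have := List.mem_takeWhile_imp hl
          simpa using this
        have hdroplen : (t.dropWhile (fun l => !pvIsHeader l)).length ≤ n := by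
          have h1 := List.length_dropWhile_le (p := fun l => !pvIsHeader l) (l := t)
          have h2 : t.length + 1 ≤ n + 1 := by simpa using hlen
          omega
        have hdropshape : (t.dropWhile (fun l => !pvIsHeader l)) = [] ∨
            ∃ h' t', (t.dropWhile (fun l => !pvIsHeader l)) = h' :: t' ∧ pvIsHeader h' = true := by
          cases hd : t.dropWhile (fun l => !pvIsHeader l) with
          | nil => exact Or.inl rfl
          | cons h' t' =>
              refine Or.inr ⟨h', t', rfl, ?_⟩
              have := List.head_dropWhile_not (p := fun l => !pvIsHeader l) (l := t)
                (by simp [hd])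
              simpa [hd] using this
        have hrec := ih _ hdroplen hdropshape (!pvKeepSegment h)
        simp only [pvFA, hhd, if_true, Bool.not_not]
        conv_lhs => rw [← hsplit]
        rw [pvFA_no_header _ _ _ hbody, hrec]
        simp only [pvSegLoop]
        cases pvKeepSegment h <;> simp

-- ===== VERDICT (by name: the statement is the Claim_ definition above) =====
theorem remove_patches_to_tests_spec : Claim_equal_remove_patches_to_tests := by
  intro s _
  unfold Spec_remove_patches_to_tests remove_patches_to_tests remove_patches_to_tests_alt
  simp only
  congr 1
  congr 1
  rw [pvFA_eq_foldl _ [] false, List.nil_append]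
  set lines := pvSplitlinesKeep s.toList with hl
  have hsplit := List.takeWhile_append_dropWhile (p := fun l => !pvIsHeader l) (l := lines)
  have hbody : ∀ l ∈ lines.takeWhile (fun l => !pvIsHeader l), pvIsHeader l = false := by
    intro l hl'
    have := List.mem_takeWhile_imp hl'
    simpa using this
  have hdropshape : (lines.dropWhile (fun l => !pvIsHeader l)) = [] ∨
      ∃ h' t', (lines.dropWhile (fun l => !pvIsHeader l)) = h' :: t' ∧ pvIsHeader h' = true := by
    cases hd : lines.dropWhile (fun l => !pvIsHeader l) with
    | nil => exact Or.inl rfl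
    | cons h' t' =>
        refine Or.inr ⟨h', t', rfl, ?_⟩
        have := List.head_dropWhile_not (p := fun l => !pvIsHeader l) (l := lines)
          (by simp [hd])
        simpa [hd] using this
  calc pvFA false lines
      = pvFA false (lines.takeWhile (fun l => !pvIsHeader l) ++
          lines.dropWhile (fun l => !pvIsHeader l)) := by rw [hsplit]
    _ = lines.takeWhile (fun l => !pvIsHeader l) ++
          pvFA false (lines.dropWhile (fun l => !pvIsHeader l)) := by
          rw [pvFA_no_header _ _ _ hbody]; simp
    _ = lines.takeWhile (fun l => !pvIsHeader l) ++
          pvSegLoop (lines.dropWhile (fun l => !pvIsHeader l)) := by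
          rw [pvFA_eq_segLoop (lines.dropWhile (fun l => !pvIsHeader l)).length _
            le_rfl hdropshape]
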